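-- pv_equiv track=rewrite | github.com/anirudh-deshpande/PythonProgramming | src/epi/recursion/hanoi_nrc_1_must.py | hanoi_nrc_1_must
-- ===== SOURCE A (Python) =====
-- import collections
--
-- NUM_PEGS = 3
--
-- def hanoi_nrc_1_must(num_rings, from_peg, to_peg, must_peg):
--
--     StackState = collections.namedtuple("StackState", ("num_rings", "from_peg", "to_peg"))
--     Move = collections.namedtuple("Move", ("from_peg", "to_peg"))
--
--     def get_aux_peg(from_peg, to_peg):
--         return [num for num in range(NUM_PEGS) if num not in [from_peg, to_peg]][0]
--
--     def hanoi(num_rings, from_peg, to_peg, must_peg):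
--
--         stack = [StackState(num_rings, from_peg, to_peg)]
--         moves = []
--
--         while stack:
--             state = stack.pop()
--
--             if state.num_rings == 1:
--                 # if state.to_peg != must_peg and state.from_peg != must_peg:
--                 #     moves.append(Move(state.from_peg, must_peg))
--                 #     moves.append(Move(must_peg, state.to_peg))
--                 # else:
--                 moves.append(Move(state.from_peg, state.to_peg))
--
--             if state.num_rings > 1:
--                 aux_peg = get_aux_peg(state.from_peg, state.to_peg)
--
--                 if state.from_peg != must_peg and state.to_peg != must_peg:
--                     stack.append(StackState(state.num_rings, state.from_peg, must_peg))
--                     stack.append(StackState(state.num_rings, must_peg, state.to_peg))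
--
--                 stack.append(StackState(state.num_rings - 1, aux_peg, state.to_peg))
--                 stack.append(StackState(1, state.from_peg, state.to_peg))
--                 stack.append(StackState(state.num_rings - 1, state.from_peg, aux_peg))
--
--         return moves
--
--     return hanoi(num_rings, from_peg, to_peg, must_peg)
-- ===== SOURCE B (Python) =====
-- import collections
--
-- def hanoi_nrc_1_must(num_rings, from_peg, to_peg, must_peg):
--     # Direct recursion mirroring the constrained-Hanoi decomposition, instead of
--     # an explicit stack machine: return the move list by concatenation.
--     Move = collections.namedtuple("Move", ("from_peg", "to_peg"))
--
--     def rec(n, fp, tp):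
--         if n == 1:
--             return [Move(fp, tp)]
--         if n < 2:
--             return []
--         aux = next(p for p in range(3) if p != fp and p != tp)
--         out = rec(n - 1, fp, aux) + [Move(fp, tp)] + rec(n - 1, aux, tp)
--         if fp != must_peg and tp != must_peg:
--             out += rec(n, must_peg, tp) + rec(n, fp, must_peg)
--         return out
--
--     return rec(num_rings, from_peg, to_peg)
-- ===== Notes on version B (the rewrite author's own statement) =====
-- stated objective: alternative
-- what changed: Replaces A's explicit-stack while-loop (a hand-rolled DFS over StackState frames) with a direct recursive decomposition that returns the move list by concatenation.
import Mathlib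
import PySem

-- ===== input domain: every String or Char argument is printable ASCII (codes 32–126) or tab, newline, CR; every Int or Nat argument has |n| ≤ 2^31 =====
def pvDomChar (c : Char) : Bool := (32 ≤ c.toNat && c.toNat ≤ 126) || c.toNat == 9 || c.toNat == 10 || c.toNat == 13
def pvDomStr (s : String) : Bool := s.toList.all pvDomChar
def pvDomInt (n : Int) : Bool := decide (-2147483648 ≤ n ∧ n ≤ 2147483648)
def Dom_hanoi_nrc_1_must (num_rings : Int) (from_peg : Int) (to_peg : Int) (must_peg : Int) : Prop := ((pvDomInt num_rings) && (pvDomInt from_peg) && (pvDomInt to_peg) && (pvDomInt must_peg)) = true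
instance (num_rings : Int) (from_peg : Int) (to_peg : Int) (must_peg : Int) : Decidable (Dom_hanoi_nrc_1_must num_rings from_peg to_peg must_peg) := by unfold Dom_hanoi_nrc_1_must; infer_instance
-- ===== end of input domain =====

-- B replaces A's explicit-stack while-loop by a direct recursion returning concatenated move lists (objective: alternative decomposition, same cost class).
-- Both loops/recursions are written with a Nat fuel argument that only makes the recursion structural; the fuel chosen
-- (a potential, resp. a rank bound, both proved sufficient below) is never exhausted, so each port computes exactly its Python.

-- ===== PORT A =====
-- get_aux_peg: first element of [num for num in range(3) if num not in [from_peg, to_peg]];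
-- that list is always nonempty (three candidates, two exclusions), so Python's `[0]` never raises and .headI is exact.
def pvGetAuxA (from_peg : Int) (to_peg : Int) : Int :=
  ((PySem.List.pyRange 0 3 1).filter (fun num => decide (num ∉ [from_peg, to_peg]))).headI

-- fuel for the while-loop: a potential that strictly decreases at every iteration (pvPot_step_* below)
def pvPot (m : Int) (s : Int × Int × Int) : Nat :=
  (if s.2.1 ≠ m ∧ s.2.2 ≠ m then 3 else 1) * 10 ^ s.1.natAbs

-- the while-loop of A: stack with the top at the head, moves accumulated in order
def pvLoopA (m : Int) : Nat → List (Int × Int × Int) → List (Int × Int) → List (Int × Int)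
  | _, [], moves => moves
  | 0, _ :: _, moves => moves   -- fuel guard; unreachable for the fuel supplied below
  | fuel + 1, (n, fp, tp) :: rest, moves =>
    let moves1 := if n == 1 then moves ++ [(fp, tp)] else moves
    if n > 1 then
      let aux := pvGetAuxA fp tp
      if fp ≠ m ∧ tp ≠ m then
        pvLoopA m fuel ([(n - 1, fp, aux), (1, fp, tp), (n - 1, aux, tp), (n, m, tp), (n, fp, m)] ++ rest) moves1
      else
        pvLoopA m fuel ([(n - 1, fp, aux), (1, fp, tp), (n - 1, aux, tp)] ++ rest) moves1
    else
      pvLoopA m fuel rest moves1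

def hanoi_nrc_1_must (num_rings : Int) (from_peg : Int) (to_peg : Int) (must_peg : Int) : List (Int × Int) :=
  pvLoopA must_peg (pvPot must_peg (num_rings, from_peg, to_peg)) [(num_rings, from_peg, to_peg)] []

-- ===== PORT B =====
-- next(p for p in range(3) if p != fp and p != tp); always finds one, so .getD 0 is exact
def pvGetAuxB (fp : Int) (tp : Int) : Int :=
  (((List.range 3).map (Int.ofNat)).find? (fun p => !(p == fp) && !(p == tp))).getD 0

-- fuel for the recursion: a rank that strictly decreases along every call (proved in pvRecB_congr below)
def pvRank (m : Int) (n : Int) (fp : Int) (tp : Int) : Nat :=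
  2 * n.natAbs + (if fp ≠ m ∧ tp ≠ m then 1 else 0)

def pvRecB (m : Int) : Nat → Int → Int → Int → List (Int × Int)
  | 0, _, _, _ => []   -- fuel guard; unreachable for the fuel supplied below
  | fuel + 1, n, fp, tp =>
    if n == 1 then [(fp, tp)]
    else if n > 1 then
      let aux := pvGetAuxB fp tp
      let out := pvRecB m fuel (n - 1) fp aux ++ [(fp, tp)] ++ pvRecB m fuel (n - 1) aux tp
      if fp ≠ m ∧ tp ≠ m then out ++ (pvRecB m fuel n m tp ++ pvRecB m fuel n fp m) else out
    else []

def hanoi_nrc_1_must_alt (num_rings : Int) (from_peg : Int) (to_peg : Int) (must_peg : Int) : List (Int × Int) :=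
  pvRecB must_peg (pvRank must_peg num_rings from_peg to_peg + 1) num_rings from_peg to_peg

-- ===== PRECONDITION & SPEC =====
def Spec_hanoi_nrc_1_must (num_rings : Int) (from_peg : Int) (to_peg : Int) (must_peg : Int) (out : List (Int × Int)) : Prop := out = hanoi_nrc_1_must_alt num_rings from_peg to_peg must_peg
instance (num_rings : Int) (from_peg : Int) (to_peg : Int) (must_peg : Int) (out : List (Int × Int)) : Decidable (Spec_hanoi_nrc_1_must num_rings from_peg to_peg must_peg out) := by unfold Spec_hanoi_nrc_1_must; infer_instance

-- ===== CLAIM (what is proved, stated in full; the proofs are below) =====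
def Claim_equal_hanoi_nrc_1_must : Prop := ∀ (num_rings : Int) (from_peg : Int) (to_peg : Int) (must_peg : Int), Dom_hanoi_nrc_1_must num_rings from_peg to_peg must_peg → Spec_hanoi_nrc_1_must num_rings from_peg to_peg must_peg (hanoi_nrc_1_must num_rings from_peg to_peg must_peg)

-- ===== LEMMAS AND PROOFS =====

-- the two aux-peg computations agree
lemma pvGetAux_eq (fp tp : Int) : pvGetAuxA fp tp = pvGetAuxB fp tp := by
  unfold pvGetAuxA pvGetAuxB
  rw [show PySem.List.pyRange 0 3 1 = [0, 1, 2] from by decide,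
    show (List.range 3).map Int.ofNat = [0, 1, 2] from by decide]
  have e : ∀ p : Int, (decide (p ∉ [fp, tp])) = (!(p == fp) && !(p == tp)) := by
    intro p; by_cases h1 : p = fp <;> by_cases h2 : p = tp <;> simp [h1, h2]
  set g := fun p : Int => !(p == fp) && !(p == tp) with hg
  have hf : ∀ p : Int, (fun num => decide (num ∉ [fp, tp])) p = g p := fun p => e p
  rw [List.filter_congr (fun p _ => hf p)]
  cases h0 : g 0 <;> cases h1 : g 1 <;> cases h2 : g 2 <;>
    simp [List.filter, List.find?, h0, h1, h2]

-- any two sufficient fuels give the same value for B's recursion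
lemma pvRecB_congr (m : Int) : ∀ f1 f2 n fp tp, pvRank m n fp tp < f1 → pvRank m n fp tp < f2 →
    pvRecB m f1 n fp tp = pvRecB m f2 n fp tp := by
  intro f1
  induction f1 with
  | zero => intro f2 n fp tp h1 _; omega
  | succ g1 ih =>
    intro f2 n fp tp h1 h2
    match f2 with
    | 0 => omega
    | g2 + 1 =>
      show pvRecB m (g1 + 1) n fp tp = pvRecB m (g2 + 1) n fp tp
      rw [pvRecB, pvRecB]
      by_cases he : (n == 1) = true
      · rw [if_pos he, if_pos he]
      · rw [if_neg he, if_neg he]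
        by_cases hgt : n > 1
        · have ha : 2 ≤ n.natAbs := by omega
          have hb : ∀ fp' tp' : Int, pvRank m (n - 1) fp' tp' < g1 ∧ pvRank m (n - 1) fp' tp' < g2 := by
            intro fp' tp'
            unfold pvRank at h1 h2 ⊢
            have hn1 : (n - 1).natAbs = n.natAbs - 1 := by omega
            split_ifs at h1 h2 ⊢ <;> omega
          rw [if_pos hgt, if_pos hgt]
          by_cases hc : fp ≠ m ∧ tp ≠ m
          · have hrk : pvRank m n fp tp = 2 * n.natAbs + 1 := by unfold pvRank; rw [if_pos hc]
            have hm1 : pvRank m n m tp < g1 ∧ pvRank m n m tp < g2 := by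
              unfold pvRank
              rw [if_neg (show ¬(m ≠ m ∧ tp ≠ m) from fun h => h.1 rfl)]
              omega
            have hm2 : pvRank m n fp m < g1 ∧ pvRank m n fp m < g2 := by
              unfold pvRank
              rw [if_neg (show ¬(fp ≠ m ∧ m ≠ m) from fun h => h.2 rfl)]
              omega
            rw [if_pos hc, if_pos hc,
              ih g2 (n - 1) fp (pvGetAuxB fp tp) (hb fp _).1 (hb fp _).2,
              ih g2 (n - 1) (pvGetAuxB fp tp) tp (hb _ tp).1 (hb _ tp).2,
              ih g2 n m tp hm1.1 hm1.2, ih g2 n fp m hm2.1 hm2.2]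
          · rw [if_neg hc, if_neg hc,
              ih g2 (n - 1) fp (pvGetAuxB fp tp) (hb fp _).1 (hb fp _).2,
              ih g2 (n - 1) (pvGetAuxB fp tp) tp (hb _ tp).1 (hb _ tp).2]
        · rw [if_neg hgt, if_neg hgt]

-- every stack entry has positive potential
lemma pvPot_pos (m : Int) (s : Int × Int × Int) : 1 ≤ pvPot m s := by
  unfold pvPot
  have : 0 < 10 ^ s.1.natAbs := pow_pos (by norm_num) _
  split_ifs <;> omega

-- one iteration of the loop strictly decreases the summed potential (branch with the two extra must-frames)
lemma pvPot_step_pos (m n fp tp : Int) (aux : Int) (rest : List (Int × Int × Int))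
    (hgt : n > 1) (hc : fp ≠ m ∧ tp ≠ m) :
    (([(n - 1, fp, aux), (1, fp, tp), (n - 1, aux, tp), (n, m, tp), (n, fp, m)] ++ rest).map (pvPot m)).sum
      < (((n, fp, tp) :: rest).map (pvPot m)).sum := by
  simp only [List.map_cons, List.map_append, List.map_nil, List.sum_cons, List.sum_append,
    List.sum_nil, pvPot, Int.natAbs_one, pow_one]
  have ha : n.natAbs = (n - 1).natAbs + 1 := by omega
  have hx10 : 10 ≤ 10 ^ (n - 1).natAbs := by
    calc (10:Nat) = 10 ^ 1 := by norm_num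
      _ ≤ 10 ^ (n - 1).natAbs := Nat.pow_le_pow_right (by norm_num) (by omega)
  have hpow : 10 ^ n.natAbs = 10 * 10 ^ (n - 1).natAbs := by rw [ha, pow_succ, mul_comm]
  have hA1 : (if fp ≠ m ∧ aux ≠ m then 3 else 1) * 10 ^ (n - 1).natAbs ≤ 3 * 10 ^ (n - 1).natAbs := by
    split_ifs <;> omega
  have hA2 : (if aux ≠ m ∧ tp ≠ m then 3 else 1) * 10 ^ (n - 1).natAbs ≤ 3 * 10 ^ (n - 1).natAbs := by
    split_ifs <;> omega
  rw [if_pos hc, if_neg (show ¬(m ≠ m ∧ tp ≠ m) from fun h => h.1 rfl),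
    if_neg (show ¬(fp ≠ m ∧ m ≠ m) from fun h => h.2 rfl), hpow]
  omega

-- one iteration of the loop strictly decreases the summed potential (branch without the must-frames)
lemma pvPot_step_neg (m n fp tp : Int) (aux : Int) (rest : List (Int × Int × Int))
    (hgt : n > 1) (hc : ¬(fp ≠ m ∧ tp ≠ m)) :
    (([(n - 1, fp, aux), (1, fp, tp), (n - 1, aux, tp)] ++ rest).map (pvPot m)).sum
      < (((n, fp, tp) :: rest).map (pvPot m)).sum := by
  simp only [List.map_cons, List.map_append, List.map_nil, List.sum_cons, List.sum_append,
    List.sum_nil, pvPot, Int.natAbs_one, pow_one]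
  have ha : n.natAbs = (n - 1).natAbs + 1 := by omega
  have hx10 : 10 ≤ 10 ^ (n - 1).natAbs := by
    calc (10:Nat) = 10 ^ 1 := by norm_num
      _ ≤ 10 ^ (n - 1).natAbs := Nat.pow_le_pow_right (by norm_num) (by omega)
  have hpow : 10 ^ n.natAbs = 10 * 10 ^ (n - 1).natAbs := by rw [ha, pow_succ, mul_comm]
  have hA1 : (if fp ≠ m ∧ aux ≠ m then 3 else 1) * 10 ^ (n - 1).natAbs ≤ 3 * 10 ^ (n - 1).natAbs := by
    split_ifs <;> omega
  have hA2 : (if aux ≠ m ∧ tp ≠ m then 3 else 1) * 10 ^ (n - 1).natAbs ≤ 3 * 10 ^ (n - 1).natAbs := by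
    split_ifs <;> omega
  rw [if_neg hc, hpow]
  omega

-- B's result at its standard fuel, as the function the loop invariant maps over the stack
def pvRecStd (m : Int) (s : Int × Int × Int) : List (Int × Int) :=
  pvRecB m (pvRank m s.1 s.2.1 s.2.2 + 1) s.1 s.2.1 s.2.2

-- unfoldings of pvRecStd
lemma pvRecStd_one (m fp tp : Int) : pvRecStd m (1, fp, tp) = [(fp, tp)] := by
  unfold pvRecStd
  rw [pvRecB]
  norm_num

lemma pvRecStd_le (m n fp tp : Int) (h : ¬ n > 1) (h1 : n ≠ 1) : pvRecStd m (n, fp, tp) = [] := by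
  unfold pvRecStd
  rw [pvRecB]
  rw [if_neg (by simpa using h1), if_neg h]

lemma pvRecStd_gt_pos (m n fp tp : Int) (h : n > 1) (hc : fp ≠ m ∧ tp ≠ m) :
    pvRecStd m (n, fp, tp) =
      pvRecStd m (n - 1, fp, pvGetAuxB fp tp) ++ [(fp, tp)] ++ pvRecStd m (n - 1, pvGetAuxB fp tp, tp)
        ++ (pvRecStd m (n, m, tp) ++ pvRecStd m (n, fp, m)) := by
  unfold pvRecStd
  rw [pvRecB]
  rw [if_neg (by simp; omega), if_pos h, if_pos hc]
  have hb : ∀ fp' tp', pvRank m (n - 1) fp' tp' < pvRank m n fp tp := by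
    intro fp' tp'
    unfold pvRank
    have hn1 : (n - 1).natAbs = n.natAbs - 1 := by omega
    have ha : 2 ≤ n.natAbs := by omega
    split_ifs <;> omega
  have hrk : pvRank m n fp tp = 2 * n.natAbs + 1 := by unfold pvRank; rw [if_pos hc]
  have hm1 : pvRank m n m tp < pvRank m n fp tp := by
    unfold pvRank
    rw [if_neg (show ¬(m ≠ m ∧ tp ≠ m) from fun h => h.1 rfl), if_pos hc]
    omega
  have hm2 : pvRank m n fp m < pvRank m n fp tp := by
    unfold pvRank
    rw [if_neg (show ¬(fp ≠ m ∧ m ≠ m) from fun h => h.2 rfl), if_pos hc]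
    omega
  rw [pvRecB_congr m (pvRank m n fp tp) (pvRank m (n - 1) fp (pvGetAuxB fp tp) + 1) (n - 1) fp
      (pvGetAuxB fp tp) (hb _ _) (by omega),
    pvRecB_congr m (pvRank m n fp tp) (pvRank m (n - 1) (pvGetAuxB fp tp) tp + 1) (n - 1)
      (pvGetAuxB fp tp) tp (hb _ _) (by omega),
    pvRecB_congr m (pvRank m n fp tp) (pvRank m n m tp + 1) n m tp hm1 (by omega),
    pvRecB_congr m (pvRank m n fp tp) (pvRank m n fp m + 1) n fp m hm2 (by omega)]

lemma pvRecStd_gt_neg (m n fp tp : Int) (h : n > 1) (hc : ¬(fp ≠ m ∧ tp ≠ m)) :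
    pvRecStd m (n, fp, tp) =
      pvRecStd m (n - 1, fp, pvGetAuxB fp tp) ++ [(fp, tp)] ++ pvRecStd m (n - 1, pvGetAuxB fp tp, tp) := by
  unfold pvRecStd
  rw [pvRecB]
  rw [if_neg (by simp; omega), if_pos h, if_neg hc]
  have hb : ∀ fp' tp', pvRank m (n - 1) fp' tp' < pvRank m n fp tp := by
    intro fp' tp'
    unfold pvRank
    have hn1 : (n - 1).natAbs = n.natAbs - 1 := by omega
    have ha : 2 ≤ n.natAbs := by omega
    split_ifs <;> omega
  rw [pvRecB_congr m (pvRank m n fp tp) (pvRank m (n - 1) fp (pvGetAuxB fp tp) + 1) (n - 1) fp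
      (pvGetAuxB fp tp) (hb _ _) (by omega),
    pvRecB_congr m (pvRank m n fp tp) (pvRank m (n - 1) (pvGetAuxB fp tp) tp + 1) (n - 1)
      (pvGetAuxB fp tp) tp (hb _ _) (by omega)]

-- loop invariant: with sufficient fuel, A's loop appends exactly B's moves for every stacked frame
lemma pvLoop_eq (m : Int) : ∀ fuel (stack : List (Int × Int × Int)) (moves : List (Int × Int)),
    (stack.map (pvPot m)).sum ≤ fuel →
    pvLoopA m fuel stack moves = moves ++ (stack.map (pvRecStd m)).flatten := by
  intro fuel
  induction fuel with
  | zero =>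
    intro stack moves hf
    match stack with
    | [] => simp [pvLoopA]
    | s :: rest =>
      exfalso
      have h1 := pvPot_pos m s
      simp only [List.map_cons, List.sum_cons] at hf
      omega
  | succ f ih =>
    intro stack moves hf
    match stack with
    | [] => simp [pvLoopA]
    | (n, fp, tp) :: rest =>
      rw [pvLoopA]
      simp only
      by_cases hgt : n > 1
      · have hne : ¬((n == 1) = true) := by simp; omega
        rw [if_neg hne, if_pos hgt, pvGetAux_eq]
        by_cases hc : fp ≠ m ∧ tp ≠ m
        · rw [if_pos hc,
            ih _ moves (by have := pvPot_step_pos m n fp tp (pvGetAuxB fp tp) rest hgt hc; omega)]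
          simp only [List.map_cons, List.map_append, List.map_nil, List.flatten_cons,
            List.flatten_append, List.flatten_nil, List.nil_append,
            pvRecStd_gt_pos m n fp tp hgt hc, pvRecStd_one, List.append_assoc]
        · rw [if_neg hc,
            ih _ moves (by have := pvPot_step_neg m n fp tp (pvGetAuxB fp tp) rest hgt hc; omega)]
          simp only [List.map_cons, List.map_append, List.map_nil, List.flatten_cons,
            List.flatten_append, List.flatten_nil, List.nil_append,
            pvRecStd_gt_neg m n fp tp hgt hc, pvRecStd_one, List.append_assoc]
      · rw [if_neg hgt]
        have hrest : (rest.map (pvPot m)).sum ≤ f := by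
          have h1 := pvPot_pos m (n, fp, tp)
          simp only [List.map_cons, List.sum_cons] at hf
          omega
        by_cases h1 : n = 1
        · rw [if_pos (by simp [h1]), ih rest (moves ++ [(fp, tp)]) hrest]
          subst h1
          simp [pvRecStd_one]
        · rw [if_neg (by simpa using h1), ih rest moves hrest]
          simp [pvRecStd_le m n fp tp hgt h1]

-- ===== VERDICT (by name: the statement is the Claim_ definition above) =====
theorem hanoi_nrc_1_must_spec : Claim_equal_hanoi_nrc_1_must := by
  intro n fp tp m _
  unfold Spec_hanoi_nrc_1_must hanoi_nrc_1_must hanoi_nrc_1_must_alt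
  rw [pvLoop_eq m _ [(n, fp, tp)] [] (by simp)]
  simp [pvRecStd]
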